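-- pv_equiv track=rewrite | github.com/bencerozovits/FYP | Model_&_Deployment_Files/BrandScraper.py | classify_comments
-- ===== SOURCE A (Python) =====
-- REAL_KEYWORDS = ["real", "authentic", "legit", "genuine", "verified"]
--
-- FAKE_KEYWORDS = ["fake", "replica", "counterfeit", "unauthentic", "not real"]
--
-- def classify_comments(comments):
--     real_count = sum(any(keyword in comment.lower() for keyword in REAL_KEYWORDS) for comment in comments)
--     fake_count = sum(any(keyword in comment.lower() for keyword in FAKE_KEYWORDS) for comment in comments)
--     if real_count > fake_count:
--         return "Real", real_count, fake_count
--     elif fake_count > real_count: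
--         return "Fake", real_count, fake_count
--     else:
--         return None, real_count, fake_count  # Skip posts if classification is uncertain
-- ===== SOURCE B (Python) =====
-- REAL_KEYWORDS = ["real", "authentic", "legit", "genuine", "verified"]
--
-- FAKE_KEYWORDS = ["fake", "replica", "counterfeit", "unauthentic", "not real"]
--
-- def _hits(comment):
--     lc = comment.lower()
--     return (1 if any(k in lc for k in REAL_KEYWORDS) else 0,
--             1 if any(k in lc for k in FAKE_KEYWORDS) else 0)
--
-- def _tally(part):
--     # divide and conquer: counts over a sublist are the sum of the counts
--     # over its two halves (addition is associative/commutative)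
--     if len(part) <= 1:
--         return _hits(part[0]) if part else (0, 0)
--     mid = len(part) // 2
--     r1, f1 = _tally(part[:mid])
--     r2, f2 = _tally(part[mid:])
--     return r1 + r2, f1 + f2
--
-- def classify_comments(comments):
--     real_count, fake_count = _tally(comments)
--     diff = real_count - fake_count
--     if diff > 0:
--         return "Real", real_count, fake_count
--     if diff < 0:
--         return "Fake", real_count, fake_count
--     return None, real_count, fake_count
-- ===== Notes on version B (the rewrite author's own statement) =====
-- stated objective: alternative
-- what changed: Replaces the two linear sum-of-any comprehensions by a recursive divide-and-conquer tally (split the list in half, tally each half, add the pairs) and classifies by the sign of the difference real_count - fake_count instead of comparing the counts twice.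
import Mathlib
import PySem

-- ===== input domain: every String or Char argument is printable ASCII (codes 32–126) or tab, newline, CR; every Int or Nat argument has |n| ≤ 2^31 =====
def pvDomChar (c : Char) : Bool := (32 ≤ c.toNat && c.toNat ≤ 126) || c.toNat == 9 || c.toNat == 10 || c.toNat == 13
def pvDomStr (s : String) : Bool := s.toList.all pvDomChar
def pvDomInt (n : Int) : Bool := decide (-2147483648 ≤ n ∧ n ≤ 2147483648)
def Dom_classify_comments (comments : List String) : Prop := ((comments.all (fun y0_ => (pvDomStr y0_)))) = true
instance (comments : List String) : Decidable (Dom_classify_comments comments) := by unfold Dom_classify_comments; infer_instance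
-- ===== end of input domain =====

-- B replaces A's two linear sum-of-any comprehensions by a divide-and-conquer tally and
-- classifies by the sign of real_count - fake_count (objective: alternative).

-- ===== PORT A =====
def pvRealKeywords : List String := ["real", "authentic", "legit", "genuine", "verified"]
def pvFakeKeywords : List String := ["fake", "replica", "counterfeit", "unauthentic", "not real"]

def classify_comments (comments : List String) : Option String × Int × Int :=
  let real_count : Int :=
    (comments.map (fun comment =>
      if pvRealKeywords.any (fun keyword => PySem.Str.isIn keyword (PySem.Str.lower comment))
      then (1 : Int) else 0)).sum
  let fake_count : Int :=
    (comments.map (fun comment =>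
      if pvFakeKeywords.any (fun keyword => PySem.Str.isIn keyword (PySem.Str.lower comment))
      then (1 : Int) else 0)).sum
  if real_count > fake_count then (some "Real", real_count, fake_count)
  else if fake_count > real_count then (some "Fake", real_count, fake_count)
  else (none, real_count, fake_count)

-- ===== PORT B =====
def pvHits (comment : String) : Int × Int :=
  let lc := PySem.Str.lower comment
  ((if pvRealKeywords.any (fun k => PySem.Str.isIn k lc) then (1 : Int) else 0),
   (if pvFakeKeywords.any (fun k => PySem.Str.isIn k lc) then (1 : Int) else 0))

-- part[:mid] / part[mid:] with 0 ≤ mid ≤ len are exactly take/drop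
def pvTally (part : List String) : Int × Int :=
  if h : part.length ≤ 1 then
    match part with
    | [] => (0, 0)
    | c :: _ => pvHits c
  else
    let mid := part.length / 2
    let l := pvTally (part.take mid)
    let r := pvTally (part.drop mid)
    (l.1 + r.1, l.2 + r.2)
termination_by part.length
decreasing_by
  · simp only [List.length_take]; omega
  · simp only [List.length_drop]; omega

def classify_comments_alt (comments : List String) : Option String × Int × Int :=
  let counts := pvTally comments
  let real_count := counts.1
  let fake_count := counts.2
  let diff := real_count - fake_count
  if diff > 0 then (some "Real", real_count, fake_count)
  else if diff < 0 then (some "Fake", real_count, fake_count)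
  else (none, real_count, fake_count)

-- ===== PRECONDITION & SPEC =====
def Spec_classify_comments (comments : List String) (out : Option String × Int × Int) : Prop := out = classify_comments_alt comments
instance (comments : List String) (out : Option String × Int × Int) : Decidable (Spec_classify_comments comments out) := by unfold Spec_classify_comments; infer_instance

-- ===== CLAIM (what is proved, stated in full; the proofs are below) =====
def Claim_equal_classify_comments : Prop := ∀ (comments : List String), Dom_classify_comments comments → Spec_classify_comments comments (classify_comments comments)

-- ===== LEMMAS AND PROOFS =====
theorem pvTally_eq (part : List String) :
    pvTally part = ((part.map (fun c => (pvHits c).1)).sum, (part.map (fun c => (pvHits c).2)).sum) := by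
  induction part using pvTally.induct with
  | case1 h1 h2 =>
    simp [pvTally]
  | case2 c rest h1 h2 =>
    simp at h1
    subst h1
    simp [pvTally]
  | case3 part h mid iha ihb =>
    rw [pvTally]
    simp only [h, dif_neg, not_false_iff]
    rw [iha, ihb]
    have := List.take_append_drop (part.length / 2) part
    conv_rhs => rw [← this]
    simp

theorem pvHits_fst (c : String) :
    (pvHits c).1 = (if pvRealKeywords.any (fun k => PySem.Str.isIn k (PySem.Str.lower c)) then (1 : Int) else 0) := rfl

theorem pvHits_snd (c : String) :
    (pvHits c).2 = (if pvFakeKeywords.any (fun k => PySem.Str.isIn k (PySem.Str.lower c)) then (1 : Int) else 0) := rfl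

-- ===== VERDICT (by name: the statement is the Claim_ definition above) =====
theorem classify_comments_spec : Claim_equal_classify_comments := by
  intro comments _
  unfold Spec_classify_comments classify_comments classify_comments_alt
  simp only [pvTally_eq, pvHits_fst, pvHits_snd]
  split_ifs <;> first | rfl | omega
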